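-- pv_equiv track=rewrite | github.com/wyl516w/dbmif | scripts/test/cer_to_csv.py | cer_stats
-- ===== SOURCE A (Python) =====
-- from typing import Dict, Tuple, Optional
--
-- def cer_stats(ref: str, hyp: str) -> Tuple[int, int, int]:
--     """Return (sub, ins, del) counts at character level."""
--     ref = ref.replace(" ", "")
--     hyp = hyp.replace(" ", "")
--     n, m = len(ref), len(hyp)
--
--     # Edit distance DP
--     dist = [[0] * (m + 1) for _ in range(n + 1)]
--     op   = [[None] * (m + 1) for _ in range(n + 1)]
--     for i in range(1, n + 1):
--         dist[i][0], op[i][0] = i, "del"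
--     for j in range(1, m + 1):
--         dist[0][j], op[0][j] = j, "ins"
--
--     for i in range(1, n + 1):
--         for j in range(1, m + 1):
--             if ref[i - 1] == hyp[j - 1]:
--                 dist[i][j], op[i][j] = dist[i - 1][j - 1], "cor"
--             else:
--                 best, best_op = dist[i - 1][j - 1] + 1, "sub"
--                 if dist[i - 1][j] + 1 < best:
--                     best, best_op = dist[i - 1][j] + 1, "del"
--                 if dist[i][j - 1] + 1 < best:
--                     best, best_op = dist[i][j - 1] + 1, "ins"
--                 dist[i][j], op[i][j] = best, best_op
--
--     sub = ins = dele = 0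
--     i, j = n, m
--     while i or j:
--         o = op[i][j]
--         if o == "cor":
--             i -= 1; j -= 1
--         elif o == "sub":
--             sub += 1; i -= 1; j -= 1
--         elif o == "del":
--             dele += 1; i -= 1
--         else:  # ins
--             ins += 1; j -= 1
--     return sub, ins, dele
-- ===== SOURCE B (Python) =====
-- def cer_stats(ref: str, hyp: str):
--     """Return (sub, ins, del) counts at character level.
--
--     Single forward rolling-row DP: each cell carries (dist, sub, ins, del);
--     no op table and no backtracking pass, and only two rows live at a time."""
--     ref = ref.replace(" ", "")
--     hyp = hyp.replace(" ", "")
--     prev = [(j, 0, j, 0) for j in range(len(hyp) + 1)]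
--     for i, rc in enumerate(ref, 1):
--         cur = [(i, 0, 0, i)]
--         for j, hc in enumerate(hyp, 1):
--             if rc == hc:
--                 best = prev[j - 1]
--             else:
--                 d, s, ins, dl = prev[j - 1]
--                 best = (d + 1, s + 1, ins, dl)
--                 if prev[j][0] + 1 < best[0]:
--                     d, s, ins, dl = prev[j]
--                     best = (d + 1, s, ins, dl + 1)
--                 if cur[j - 1][0] + 1 < best[0]:
--                     d, s, ins, dl = cur[j - 1]
--                     best = (d + 1, s, ins + 1, dl)
--             cur.append(best)
--         prev = cur
--     _, s, i, d = prev[-1]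
--     return s, i, d
-- ===== Notes on version B (the rewrite author's own statement) =====
-- stated objective: simpler
-- what changed: Replaced the full dist table plus op table plus backward backtracking pass by a single forward two-row DP whose cells carry (dist, sub, ins, del); the chosen predecessor's counts are inherited with the selected operation incremented, so the op table and the backtracking loop disappear and only two rows are kept in memory.
import Mathlib
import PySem

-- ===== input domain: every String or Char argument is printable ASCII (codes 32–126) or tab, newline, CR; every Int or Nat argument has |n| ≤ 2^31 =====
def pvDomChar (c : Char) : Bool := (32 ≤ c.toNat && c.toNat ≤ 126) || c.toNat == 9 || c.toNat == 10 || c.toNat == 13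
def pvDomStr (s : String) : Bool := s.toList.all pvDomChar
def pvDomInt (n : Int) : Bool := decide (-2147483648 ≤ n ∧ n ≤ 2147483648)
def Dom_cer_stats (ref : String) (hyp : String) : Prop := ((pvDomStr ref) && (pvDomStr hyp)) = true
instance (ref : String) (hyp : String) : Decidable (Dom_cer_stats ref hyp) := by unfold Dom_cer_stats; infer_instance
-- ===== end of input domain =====

-- B replaces A's dist table + op table + backward backtracking pass by a single forward
-- two-row DP whose cells carry (dist, sub, ins, del); same values, simpler decomposition.

-- ===== PORT A =====
-- one inner row (i ≥ 1) of A's dist/op tables; the row is accumulated reversed (head = last filled cell)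
def pvRowA (prev : List Int) (i : Int) (c : Char) (h : List Char) : List Int × List (Option String) :=
  let st := (PySem.List.enumerate h 1).foldl
    (fun (st : List Int × List (Option String)) jc =>
      let j := jc.1
      let hc := jc.2
      if c == hc then
        (PySem.List.pyGetD prev (j - 1) 0 :: st.1, some "cor" :: st.2)
      else
        let b1 : Int × String := (PySem.List.pyGetD prev (j - 1) 0 + 1, "sub")
        let b2 : Int × String :=
          if PySem.List.pyGetD prev j 0 + 1 < b1.1 then (PySem.List.pyGetD prev j 0 + 1, "del") else b1
        let b3 : Int × String :=
          if st.1.headD 0 + 1 < b2.1 then (st.1.headD 0 + 1, "ins") else b2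
        (b3.1 :: st.1, some b3.2 :: st.2))
    ([i], [some "del"])
  (st.1.reverse, st.2.reverse)

-- the rows i = i0+1 … n, each built from the previous dist row, as in A's outer loop
def pvRowsA (h : List Char) : List Char → List Int → Int → List (List Int) × List (List (Option String))
  | [], _, _ => ([], [])
  | c :: rest, prev, i =>
    let row := pvRowA prev i c h
    let tailRows := pvRowsA h rest row.1 (i + 1)
    (row.1 :: tailRows.1, row.2 :: tailRows.2)

-- A's backtracking while-loop (fuel n+m always suffices: every step decreases i+j)
def pvBackA (op : List (List (Option String))) : Nat → Nat → Nat → Int × Int × Int → Int × Int × Int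
  | 0, _, _, acc => acc
  | fuel + 1, i, j, acc =>
    if i = 0 ∧ j = 0 then acc
    else
      let o := (op.getD i []).getD j none
      if o == some "cor" then pvBackA op fuel (i - 1) (j - 1) acc
      else if o == some "sub" then pvBackA op fuel (i - 1) (j - 1) (acc.1 + 1, acc.2.1, acc.2.2)
      else if o == some "del" then pvBackA op fuel (i - 1) j (acc.1, acc.2.1, acc.2.2 + 1)
      else pvBackA op fuel i (j - 1) (acc.1, acc.2.1 + 1, acc.2.2)

def cer_stats (ref : String) (hyp : String) : Int × Int × Int :=
  let r := (PySem.Str.replace ref " " "").toList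
  let h := (PySem.Str.replace hyp " " "").toList
  let n := r.length
  let m := h.length
  let row0 : List Int := PySem.List.pyRange 0 ((m : Int) + 1) 1
  let orow0 : List (Option String) := none :: List.replicate m (some "ins")
  let rows := pvRowsA h r row0 1
  let op := orow0 :: rows.2
  pvBackA op (n + m) n m (0, 0, 0)

-- ===== PORT B =====
-- one row of B's forward DP; each cell is (dist, sub, ins, del)
def pvRowB (prev : List (Int × Int × Int × Int)) (i : Int) (rc : Char) (h : List Char) :
    List (Int × Int × Int × Int) :=
  (PySem.List.enumerate h 1).foldl
    (fun cur jhc =>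
      let j := jhc.1
      let hc := jhc.2
      let best :=
        if rc == hc then PySem.List.pyGetD prev (j - 1) (0, 0, 0, 0)
        else
          let p := PySem.List.pyGetD prev (j - 1) (0, 0, 0, 0)
          let b1 := (p.1 + 1, p.2.1 + 1, p.2.2.1, p.2.2.2)
          let q := PySem.List.pyGetD prev j (0, 0, 0, 0)
          let b2 := if q.1 + 1 < b1.1 then (q.1 + 1, q.2.1, q.2.2.1, q.2.2.2 + 1) else b1
          let w := PySem.List.pyGetD cur (j - 1) (0, 0, 0, 0)
          if w.1 + 1 < b2.1 then (w.1 + 1, w.2.1, w.2.2.1 + 1, w.2.2.2) else b2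
      cur ++ [best])
    [(i, 0, 0, i)]

def cer_stats_alt (ref : String) (hyp : String) : Int × Int × Int :=
  let r := (PySem.Str.replace ref " " "").toList
  let h := (PySem.Str.replace hyp " " "").toList
  let prev0 : List (Int × Int × Int × Int) :=
    (PySem.List.pyRange 0 ((h.length : Int) + 1) 1).map (fun j => (j, 0, j, 0))
  let finalRow := (PySem.List.enumerate r 1).foldl (fun prev irc => pvRowB prev irc.1 irc.2 h) prev0
  let last := PySem.List.pyGetD finalRow (-1) (0, 0, 0, 0)
  (last.2.1, last.2.2.1, last.2.2.2)

-- ===== PRECONDITION & SPEC =====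
def Spec_cer_stats (ref : String) (hyp : String) (out : Int × Int × Int) : Prop := out = cer_stats_alt ref hyp
instance (ref : String) (hyp : String) (out : Int × Int × Int) : Decidable (Spec_cer_stats ref hyp out) := by unfold Spec_cer_stats; infer_instance

-- ===== CLAIM (what is proved, stated in full; the proofs are below) =====
def Claim_equal_cer_stats : Prop := ∀ (ref : String) (hyp : String), Dom_cer_stats ref hyp → Spec_cer_stats ref hyp (cer_stats ref hyp)

-- ===== LEMMAS AND PROOFS =====

def pvCell (r h : List Char) : Nat → Nat → Int × Int × Int × Int
  | 0, j => ((j : Int), 0, (j : Int), 0)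
  | i + 1, 0 => ((i : Int) + 1, 0, 0, (i : Int) + 1)
  | i + 1, j + 1 =>
    if r.getD i ' ' == h.getD j ' ' then pvCell r h i j
    else
      let p := pvCell r h i j
      let b1 := (p.1 + 1, p.2.1 + 1, p.2.2.1, p.2.2.2)
      let q := pvCell r h i (j + 1)
      let b2 := if q.1 + 1 < b1.1 then (q.1 + 1, q.2.1, q.2.2.1, q.2.2.2 + 1) else b1
      let w := pvCell r h (i + 1) j
      if w.1 + 1 < b2.1 then (w.1 + 1, w.2.1, w.2.2.1 + 1, w.2.2.2) else b2
termination_by i j => i + j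

def pvOp (r h : List Char) : Nat → Nat → Option String
  | 0, 0 => none
  | _ + 1, 0 => some "del"
  | 0, _ + 1 => some "ins"
  | i + 1, j + 1 =>
    if r.getD i ' ' == h.getD j ' ' then some "cor"
    else
      let b1 : Int × String := ((pvCell r h i j).1 + 1, "sub")
      let b2 : Int × String :=
        if (pvCell r h i (j + 1)).1 + 1 < b1.1 then ((pvCell r h i (j + 1)).1 + 1, "del") else b1
      let b3 : Int × String :=
        if (pvCell r h (i + 1) j).1 + 1 < b2.1 then ((pvCell r h (i + 1) j).1 + 1, "ins") else b2
      some b3.2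

def pvDRow (r h : List Char) (i : Nat) : List Int :=
  (List.range (h.length + 1)).map (fun j => (pvCell r h i j).1)

def pvORow (r h : List Char) (i : Nat) : List (Option String) :=
  (List.range (h.length + 1)).map (fun j => pvOp r h i j)

lemma pvGetD_map_range {α : Type} (f : Nat → α) (n k : Nat) (d : α) (hk : k < n) :
    ((List.range n).map f).getD k d = f k := by
  simp [List.getD, hk]

lemma pvHeadD_rev_map_range {α : Type} (f : Nat → α) (k : Nat) (d : α) :
    (((List.range (k + 1)).map f).reverse).headD d = f k := by
  simp [List.range_succ]

lemma pvRevMapRange_succ {α : Type} (f : Nat → α) (k : Nat) :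
    ((List.range (k + 1 + 1)).map f).reverse = f (k + 1) :: ((List.range (k + 1)).map f).reverse := by
  simp [List.range_succ (n := k + 1)]

lemma pvFoldl_enumerate_drop {α β : Type} (g : β → Int × α → β) (h : List α) (S : Nat → β)
    (step : ∀ k, (hk : k < h.length) → g (S k) (((k : Int) + 1), h[k]) = S (k + 1)) :
    ∀ (t : List α) (k : Nat), h.drop k = t → k ≤ h.length →
      (PySem.List.enumerate t ((k : Int) + 1)).foldl g (S k) = S h.length := by
  intro t
  induction t with
  | nil =>
    intro k hdrop hk
    have hle : h.length ≤ k := by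
      by_contra hlt
      have := List.drop_eq_nil_iff.mp hdrop
      omega
    have hkk : k = h.length := le_antisymm hk hle
    subst hkk
    simp [PySem.List.enumerate]
  | cons c t ih =>
    intro k hdrop hk
    have hklt : k < h.length := by
      by_contra hge
      rw [List.drop_eq_nil_of_le (by omega)] at hdrop
      simp at hdrop
    have hc : h[k] = c := by
      have h1 : (h.drop k).head? = h[k]? := List.head?_drop ..
      rw [hdrop] at h1
      simp [List.getElem?_eq_getElem hklt] at h1
      exact h1.symm
    have hdrop' : h.drop (k + 1) = t := by
      have h2 := congrArg List.tail hdrop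
      simpa [List.tail_drop] using h2
    rw [PySem.List.enumerate_cons]
    simp only [List.foldl_cons]
    rw [← hc, step k hklt]
    have h3 := ih (k + 1) hdrop' (by omega)
    have hcast : ((k : Int) + 1 + 1) = (((k + 1 : Nat) : Int) + 1) := by push_cast; ring
    rw [hcast]
    exact h3

lemma pvRowA_spec (r h : List Char) (i : Nat) :
    pvRowA (pvDRow r h i) ((i : Int) + 1) (r.getD i ' ') h
      = (pvDRow r h (i + 1), pvORow r h (i + 1)) := by
  unfold pvRowA
  have key := pvFoldl_enumerate_drop
    (g := fun (st : List Int × List (Option String)) jc =>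
      let j := jc.1
      let hc := jc.2
      if r.getD i ' ' == hc then
        (PySem.List.pyGetD (pvDRow r h i) (j - 1) 0 :: st.1, some "cor" :: st.2)
      else
        let b1 : Int × String := (PySem.List.pyGetD (pvDRow r h i) (j - 1) 0 + 1, "sub")
        let b2 : Int × String :=
          if PySem.List.pyGetD (pvDRow r h i) j 0 + 1 < b1.1 then (PySem.List.pyGetD (pvDRow r h i) j 0 + 1, "del") else b1
        let b3 : Int × String :=
          if st.1.headD 0 + 1 < b2.1 then (st.1.headD 0 + 1, "ins") else b2
        (b3.1 :: st.1, some b3.2 :: st.2))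
    h
    (S := fun k => ((((List.range (k + 1)).map (fun j => (pvCell r h (i + 1) j).1)).reverse),
                    (((List.range (k + 1)).map (fun j => pvOp r h (i + 1) j)).reverse)))
    ?step h 0 (by simp) (by omega)
  case step =>
    intro k hk
    have hgd : h.getD k ' ' = h[k] := List.getD_eq_getElem h ' ' hk
    have e1 : ((k : Int) + 1 - 1) = ((k : Nat) : Int) := by ring
    have e2 : ((k : Int) + 1) = (((k + 1 : Nat)) : Int) := by push_cast; ring
    have e3 : (((k + 1 : Nat)) : Int) - 1 = ((k : Nat) : Int) := by push_cast; ring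
    simp only [e2, e3, PySem.List.pyGetD_natCast]
    unfold pvDRow
    simp only [pvGetD_map_range _ _ _ _ (show k < h.length + 1 by omega),
      pvGetD_map_range _ _ _ _ (show k + 1 < h.length + 1 by omega),
      pvHeadD_rev_map_range, pvRevMapRange_succ]
    simp only [pvCell, pvOp, hgd]
    clear e1 e2 e3
    split_ifs <;> simp
  have hS0d : ((List.range (0 + 1)).map (fun j => (pvCell r h (i + 1) j).1)).reverse = [((i : Int) + 1)] := by
    simp [pvCell]
  have hS0o : ((List.range (0 + 1)).map (fun j => pvOp r h (i + 1) j)).reverse = [some "del"] := by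
    simp [pvOp]
  simp only [hS0d, hS0o, Nat.cast_zero, zero_add] at key
  rw [key]
  simp [pvDRow, pvORow]

def pvBRow (r h : List Char) (i : Nat) : List (Int × Int × Int × Int) :=
  (List.range (h.length + 1)).map (pvCell r h i)

lemma pvRowB_spec (r h : List Char) (i : Nat) :
    pvRowB (pvBRow r h i) ((i : Int) + 1) (r.getD i ' ') h = pvBRow r h (i + 1) := by
  unfold pvRowB
  have key := pvFoldl_enumerate_drop
    (g := fun (cur : List (Int × Int × Int × Int)) jhc =>
      let j := jhc.1
      let hc := jhc.2
      let best :=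
        if r.getD i ' ' == hc then PySem.List.pyGetD (pvBRow r h i) (j - 1) (0, 0, 0, 0)
        else
          let p := PySem.List.pyGetD (pvBRow r h i) (j - 1) (0, 0, 0, 0)
          let b1 := (p.1 + 1, p.2.1 + 1, p.2.2.1, p.2.2.2)
          let q := PySem.List.pyGetD (pvBRow r h i) j (0, 0, 0, 0)
          let b2 := if q.1 + 1 < b1.1 then (q.1 + 1, q.2.1, q.2.2.1, q.2.2.2 + 1) else b1
          let w := PySem.List.pyGetD cur (j - 1) (0, 0, 0, 0)
          if w.1 + 1 < b2.1 then (w.1 + 1, w.2.1, w.2.2.1 + 1, w.2.2.2) else b2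
      cur ++ [best])
    h
    (S := fun k => (List.range (k + 1)).map (pvCell r h (i + 1)))
    ?step h 0 (by simp) (by omega)
  case step =>
    intro k hk
    have hgd : h.getD k ' ' = h[k] := List.getD_eq_getElem h ' ' hk
    have e2 : ((k : Int) + 1) = (((k + 1 : Nat)) : Int) := by push_cast; ring
    have e3 : (((k + 1 : Nat)) : Int) - 1 = ((k : Nat) : Int) := by push_cast; ring
    simp only [e2, e3, PySem.List.pyGetD_natCast]
    unfold pvBRow
    simp only [pvGetD_map_range _ _ _ _ (show k < h.length + 1 by omega),
      pvGetD_map_range _ _ _ _ (show k + 1 < h.length + 1 by omega),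
      pvGetD_map_range _ (k + 1) k _ (show k < k + 1 by omega),
      List.range_succ (n := k + 1), List.map_append, List.map_cons, List.map_nil]
    simp only [pvCell, hgd]
  have hS0 : (List.range 1).map (pvCell r h (i + 1)) = [((i : Int) + 1, 0, 0, (i : Int) + 1)] := by
    simp [List.range_succ, pvCell]
  simp only [Nat.cast_zero, zero_add] at key
  rw [hS0] at key
  rw [key]
  rfl

lemma pvRowsA_spec (r h : List Char) :
    ∀ (t : List Char) (i0 : Nat), r.drop i0 = t →
      pvRowsA h t (pvDRow r h i0) ((i0 : Int) + 1)
        = ((List.range (r.length - i0)).map (fun k => pvDRow r h (i0 + 1 + k)),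
           (List.range (r.length - i0)).map (fun k => pvORow r h (i0 + 1 + k))) := by
  intro t
  induction t generalizing r with
  | nil =>
    intro i0 hdrop
    have : r.length ≤ i0 := by
      by_contra hlt
      have := List.drop_eq_nil_iff.mp hdrop
      omega
    rw [show r.length - i0 = 0 by omega]
    simp [pvRowsA]
  | cons c rest ih =>
    intro i0 hdrop
    have hlt : i0 < r.length := by
      by_contra hge
      rw [List.drop_eq_nil_of_le (by omega)] at hdrop
      simp at hdrop
    have hc : c = r.getD i0 ' ' := by
      have h1 : (r.drop i0).head? = r[i0]? := List.head?_drop ..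
      rw [hdrop] at h1
      simp [List.getElem?_eq_getElem hlt] at h1
      rw [List.getD_eq_getElem r ' ' hlt, h1]
    have hdrop' : r.drop (i0 + 1) = rest := by
      have h2 := congrArg List.tail hdrop
      simpa [List.tail_drop] using h2
    have hcast : ((i0 : Int) + 1 + 1) = (((i0 + 1 : Nat)) : Int) + 1 := by push_cast; ring
    show (let row := pvRowA (pvDRow r h i0) ((i0 : Int) + 1) c h
          let tailRows := pvRowsA h rest row.1 ((i0 : Int) + 1 + 1)
          (row.1 :: tailRows.1, row.2 :: tailRows.2)) = _
    rw [hc]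
    simp only [pvRowA_spec r h i0, hcast]
    rw [ih r (i0 + 1) hdrop']
    rw [show r.length - i0 = (r.length - (i0 + 1)) + 1 by omega]
    simp only [List.range_succ_eq_map, List.map_cons, List.map_map]
    congr 1 <;>
      · simp only [Nat.add_zero]
        refine congrArg₂ _ rfl (List.map_congr_left ?_)
        intro k _
        simp only [Function.comp_apply, Nat.succ_eq_add_one]
        rw [show i0 + 1 + (k + 1) = i0 + 1 + 1 + k by omega]

lemma pvFoldB_spec (r h : List Char) :
    (PySem.List.enumerate r 1).foldl (fun prev irc => pvRowB prev irc.1 irc.2 h) (pvBRow r h 0)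
      = pvBRow r h r.length := by
  have key := pvFoldl_enumerate_drop
    (g := fun prev irc => pvRowB prev irc.1 irc.2 h) r (S := pvBRow r h)
    ?step r 0 (by simp) (by omega)
  case step =>
    intro k hk
    have hs := pvRowB_spec r h k
    rw [List.getD_eq_getElem r ' ' hk] at hs
    exact hs
  simpa using key

lemma pvBackA_spec (r h : List Char) (opT : List (List (Option String)))
    (hop : ∀ i j, i ≤ r.length → j ≤ h.length → (opT.getD i []).getD j none = pvOp r h i j) :
    ∀ (fuel i j : Nat) (acc : Int × Int × Int), i ≤ r.length → j ≤ h.length → i + j ≤ fuel →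
      pvBackA opT fuel i j acc
        = (acc.1 + (pvCell r h i j).2.1, acc.2.1 + (pvCell r h i j).2.2.1,
           acc.2.2 + (pvCell r h i j).2.2.2) := by
  intro fuel
  induction fuel with
  | zero =>
    intro i j acc hi hj hf
    have hi0 : i = 0 := by omega
    have hj0 : j = 0 := by omega
    subst hi0; subst hj0
    simp [pvBackA, pvCell]
  | succ fuel ih =>
    intro i j acc hi hj hf
    rcases i with _ | i' <;> rcases j with _ | j'
    · simp [pvBackA, pvCell]
    · have ho := hop 0 (j' + 1) (by omega) hj
      simp only [pvBackA]
      rw [if_neg (by omega), ho]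
      simp [pvOp]
      rw [ih 0 j' _ (by omega) (by omega) (by omega)]
      simp [pvCell]
      ring_nf
      try simp
    · have ho := hop (i' + 1) 0 hi (by omega)
      simp only [pvBackA]
      rw [if_neg (by omega), ho]
      simp [pvOp]
      rw [ih i' 0 _ (by omega) (by omega) (by omega)]
      rcases i' with _ | i''
      · simp [pvCell]
      · simp [pvCell]; ring_nf
    · have ho := hop (i' + 1) (j' + 1) hi hj
      simp only [pvBackA]
      rw [if_neg (by omega), ho]
      by_cases hce : r[i']?.getD ' ' = h[j']?.getD ' '
      · have hceB : (r.getD i' ' ' == h.getD j' ' ') = true := by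
          simpa [List.getD] using hce
        simp [pvOp, hce]
        rw [ih i' j' _ (by omega) (by omega) (by omega)]
        rw [show pvCell r h (i' + 1) (j' + 1) = pvCell r h i' j' by
          rw [pvCell, if_pos hceB]]
      · have hceB : ¬(r.getD i' ' ' == h.getD j' ' ') = true := by
          simpa [List.getD] using hce
        have hcell : pvCell r h (i' + 1) (j' + 1) =
            (let p := pvCell r h i' j'
             let b1 := (p.1 + 1, p.2.1 + 1, p.2.2.1, p.2.2.2)
             let q := pvCell r h i' (j' + 1)
             let b2 := if q.1 + 1 < b1.1 then (q.1 + 1, q.2.1, q.2.2.1, q.2.2.2 + 1) else b1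
             let w := pvCell r h (i' + 1) j'
             if w.1 + 1 < b2.1 then (w.1 + 1, w.2.1, w.2.2.1 + 1, w.2.2.2) else b2) := by
          rw [pvCell, if_neg hceB]
        by_cases c1 : (pvCell r h i' (j' + 1)).1 < (pvCell r h i' j').1
        · by_cases c2 : (pvCell r h (i' + 1) j').1 < (pvCell r h i' (j' + 1)).1
          · -- ins
            simp [pvOp, hce, c1, c2]
            rw [ih (i' + 1) j' _ (by omega) (by omega) (by omega)]
            simp [c1, c2] at hcell
            rw [hcell]
            simp
            ring
          · -- del
            simp [pvOp, hce, c1, c2]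
            rw [ih i' (j' + 1) _ (by omega) (by omega) (by omega)]
            simp [c1, c2] at hcell
            rw [hcell]
            simp
            ring
        · by_cases c2 : (pvCell r h (i' + 1) j').1 < (pvCell r h i' j').1
          · -- ins over sub
            simp [pvOp, hce, c1, c2]
            rw [ih (i' + 1) j' _ (by omega) (by omega) (by omega)]
            simp [c1, c2] at hcell
            rw [hcell]
            simp
            ring
          · -- sub
            simp [pvOp, hce, c1, c2]
            rw [ih i' j' _ (by omega) (by omega) (by omega)]
            simp [c1, c2] at hcell
            rw [hcell]
            simp
            ring

lemma pvRow0_eq (r h : List Char) :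
    PySem.List.pyRange 0 ((h.length : Int) + 1) 1 = pvDRow r h 0 := by
  rw [PySem.List.pyRange_one]
  unfold pvDRow
  rw [show (((h.length : Int) + 1) - 0).toNat = h.length + 1 by omega]
  refine List.map_congr_left ?_
  intro k _
  simp [pvCell]

lemma pvORow0_eq (r h : List Char) :
    pvORow r h 0 = none :: List.replicate h.length (some "ins") := by
  unfold pvORow
  rw [List.range_succ_eq_map, List.map_cons, List.map_map]
  have h1 : pvOp r h 0 0 = none := by simp [pvOp]
  have h2 : List.map ((fun j => pvOp r h 0 j) ∘ Nat.succ) (List.range h.length)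
      = List.replicate h.length (some "ins") := by
    refine List.eq_replicate_iff.mpr ⟨by simp, ?_⟩
    intro b hb
    simp only [List.mem_map, List.mem_range, Function.comp_apply] at hb
    obtain ⟨a, _, rfl⟩ := hb
    simp [pvOp]
  rw [h1, h2]

lemma pvOpTable_getD (r h : List Char) (i j : Nat) (hi : i ≤ r.length) (hj : j ≤ h.length) :
    ((((none :: List.replicate h.length (some "ins"))
        :: (pvRowsA h r (PySem.List.pyRange 0 ((h.length : Int) + 1) 1) 1).2).getD i []).getD j none)
      = pvOp r h i j := by
  rw [pvRow0_eq r h, ← pvORow0_eq r h]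
  have hrows := pvRowsA_spec r h r 0 (by simp)
  rw [show (1 : Int) = ((0 : Nat) : Int) + 1 by norm_num, hrows]
  rcases i with _ | i'
  · rw [List.getD_cons_zero]
    unfold pvORow
    exact pvGetD_map_range _ _ _ _ (by omega)
  · rw [List.getD_cons_succ]
    rw [show r.length - 0 = r.length by omega]
    rw [pvGetD_map_range _ _ _ _ (show i' < r.length by omega)]
    rw [show 0 + 1 + i' = i' + 1 by omega]
    unfold pvORow
    exact pvGetD_map_range _ _ _ _ (by omega)

lemma pvA_core (r h : List Char) :
    pvBackA ((none :: List.replicate h.length (some "ins"))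
        :: (pvRowsA h r (PySem.List.pyRange 0 ((h.length : Int) + 1) 1) 1).2)
      (r.length + h.length) r.length h.length (0, 0, 0)
      = ((pvCell r h r.length h.length).2.1, (pvCell r h r.length h.length).2.2.1,
         (pvCell r h r.length h.length).2.2.2) := by
  rw [pvBackA_spec r h _ (fun i j hi hj => pvOpTable_getD r h i j hi hj)
    (r.length + h.length) r.length h.length (0, 0, 0) le_rfl le_rfl le_rfl]
  simp

lemma pvB_core (r h : List Char) :
    PySem.List.pyGetD
      ((PySem.List.enumerate r 1).foldl (fun prev irc => pvRowB prev irc.1 irc.2 h)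
        ((PySem.List.pyRange 0 ((h.length : Int) + 1) 1).map (fun j => (j, (0 : Int), j, (0 : Int)))))
      (-1) (0, 0, 0, 0)
      = pvCell r h r.length h.length := by
  have hprev0 : (PySem.List.pyRange 0 ((h.length : Int) + 1) 1).map (fun j => (j, (0 : Int), j, (0 : Int)))
      = pvBRow r h 0 := by
    rw [PySem.List.pyRange_one]
    unfold pvBRow
    rw [show (((h.length : Int) + 1) - 0).toNat = h.length + 1 by omega, List.map_map]
    refine List.map_congr_left ?_
    intro k _
    simp [pvCell]
  rw [hprev0, pvFoldB_spec]
  unfold pvBRow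
  rw [List.range_succ, List.map_append, List.map_cons, List.map_nil]
  exact PySem.List.pyGetD_neg_one_append_singleton ..

-- ===== VERDICT (by name: the statement is the Claim_ definition above) =====
theorem cer_stats_spec : Claim_equal_cer_stats := by
  intro ref hyp _
  unfold Spec_cer_stats
  show cer_stats ref hyp = cer_stats_alt ref hyp
  simp only [cer_stats, cer_stats_alt]
  rw [pvA_core, pvB_core]
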